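-- pv_equiv track=rewrite | github.com/seanschneidewent/maestro-openclaw-agent-teams | maestro/loader.py | resolve_page
-- ===== SOURCE A (Python) =====
-- from typing import Any
--
-- def resolve_page(project: dict[str, Any], page_name: str) -> dict[str, Any] | None:
--     """
--     Fuzzy-match a page name within a project.
--
--     Tries: exact match → prefix match → substring match.
--     Returns None if no match found.
--     """
--     pages = project.get("pages", {})
--
--     # Exact match
--     if page_name in pages:
--         return pages[page_name]
--
--     normalized = page_name.replace(".", "_").replace("-", "_").replace(" ", "_").strip("_")
--
--     # Prefix match
--     candidates = [
--         (n, p) for n, p in pages.items()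
--         if n.startswith(normalized) or n.startswith(normalized + "_")
--     ]
--     if len(candidates) == 1:
--         return candidates[0][1]
--
--     # Substring match
--     if not candidates:
--         lower = normalized.lower()
--         candidates = [(n, p) for n, p in pages.items() if lower in n.lower()]
--
--     if candidates:
--         return candidates[0][1]
--     return None
-- ===== SOURCE B (Python) =====
-- def resolve_page(project, page_name):
--     pages = project.get("pages", {})
--     if page_name in pages:
--         return pages[page_name]
--     normalized = page_name.replace(".", "_").replace("-", "_").replace(" ", "_").strip("_")
--     lower = normalized.lower()
--     # single pass: record the first prefix hit and the first substring hit simultaneously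
--     # (startswith(normalized + "_") is subsumed by startswith(normalized))
--     prefix_hit = None
--     substr_hit = None
--     for n, p in pages.items():
--         if prefix_hit is None and n.startswith(normalized):
--             prefix_hit = p
--         if substr_hit is None and lower in n.lower():
--             substr_hit = p
--     return prefix_hit if prefix_hit is not None else substr_hit
-- ===== Notes on version B (the rewrite author's own statement) =====
-- stated objective: alternative
-- what changed: Replaces the collect-all-candidates comprehensions with len==1/empty branching by a single pass over pages.items() maintaining two accumulators (first prefix hit, first substring hit), exploiting that startswith(normalized + '_') is subsumed by startswith(normalized) and that A always returns the first prefix candidate.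
import Mathlib
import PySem

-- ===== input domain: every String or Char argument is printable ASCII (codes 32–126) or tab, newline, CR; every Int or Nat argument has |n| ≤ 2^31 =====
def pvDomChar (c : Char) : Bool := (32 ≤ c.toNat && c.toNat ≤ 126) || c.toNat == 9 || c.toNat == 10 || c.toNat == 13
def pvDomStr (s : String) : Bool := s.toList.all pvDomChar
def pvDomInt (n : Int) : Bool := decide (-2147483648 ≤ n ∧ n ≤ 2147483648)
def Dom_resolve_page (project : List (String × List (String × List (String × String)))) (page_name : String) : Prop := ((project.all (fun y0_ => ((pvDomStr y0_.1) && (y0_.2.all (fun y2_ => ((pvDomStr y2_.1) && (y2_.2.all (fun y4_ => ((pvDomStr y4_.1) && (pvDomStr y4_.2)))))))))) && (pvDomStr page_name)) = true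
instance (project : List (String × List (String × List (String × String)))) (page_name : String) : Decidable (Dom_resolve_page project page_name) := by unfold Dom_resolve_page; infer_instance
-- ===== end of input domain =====

-- ===== PORT A =====
-- header: B does one pass keeping two accumulators instead of A's staged comprehensions (return value only; no mutation).
def resolve_page (project : List (String × List (String × List (String × String)))) (page_name : String) : Option (List (String × String)) :=
  let pages : PySem.Dict String (List (String × String)) :=
    PySem.Dict.mk ((PySem.Dict.mk project).getD "pages" [])
  if pages.contains page_name then
    pages.get? page_name
  else
    let normalized := PySem.Str.stripChars
      (PySem.Str.replace (PySem.Str.replace (PySem.Str.replace page_name "." "_") "-" "_") " " "_") "_"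
    let candidates := pages.items.filter
      (fun np => PySem.Str.startswith np.1 normalized || PySem.Str.startswith np.1 (normalized ++ "_"))
    if candidates.length == 1 then
      candidates.head?.map (fun np => np.2)
    else
      let candidates :=
        if candidates.isEmpty then
          let lower := PySem.Str.lower normalized
          pages.items.filter (fun np => PySem.Str.isIn lower (PySem.Str.lower np.1))
        else candidates
      if !candidates.isEmpty then candidates.head?.map (fun np => np.2) else none

-- ===== PORT B =====
def resolve_page_alt (project : List (String × List (String × List (String × String)))) (page_name : String) : Option (List (String × String)) :=
  let pages : PySem.Dict String (List (String × String)) :=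
    PySem.Dict.mk ((PySem.Dict.mk project).getD "pages" [])
  match pages.get? page_name with
  | some v => some v
  | none =>
    let normalized := PySem.Str.stripChars
      (PySem.Str.replace (PySem.Str.replace (PySem.Str.replace page_name "." "_") "-" "_") " " "_") "_"
    let lower := PySem.Str.lower normalized
    let hits := pages.items.foldl
      (fun (acc : Option (List (String × String)) × Option (List (String × String))) np =>
        ( if acc.1.isNone && PySem.Str.startswith np.1 normalized then some np.2 else acc.1,
          if acc.2.isNone && PySem.Str.isIn lower (PySem.Str.lower np.1) then some np.2 else acc.2))
      (none, none)
    match hits.1 with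
    | some p => some p
    | none => hits.2

-- ===== PRECONDITION & SPEC =====
def Spec_resolve_page (project : List (String × List (String × List (String × String)))) (page_name : String) (out : Option (List (String × String))) : Prop := out = resolve_page_alt project page_name
instance (project : List (String × List (String × List (String × String)))) (page_name : String) (out : Option (List (String × String))) : Decidable (Spec_resolve_page project page_name out) := by unfold Spec_resolve_page; infer_instance

-- ===== CLAIM (what is proved, stated in full; the proofs are below) =====
def Claim_equal_resolve_page : Prop := ∀ (project : List (String × List (String × List (String × String)))) (page_name : String), Dom_resolve_page project page_name → Spec_resolve_page project page_name (resolve_page project page_name)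

-- ===== LEMMAS AND PROOFS =====

theorem pv_find?_eq_head?_filter {α : Type} (p : α → Bool) (l : List α) :
    l.find? p = (l.filter p).head? := by
  induction l with
  | nil => rfl
  | cons a t ih =>
    simp only [List.find?_cons, List.filter_cons]
    cases h : p a with
    | true => simp
    | false => simp only [Bool.false_eq_true, if_false]; exact ih

theorem pv_startswith_imp (n normalized : String)
    (h : PySem.Str.startswith n (normalized ++ "_") = true) :
    PySem.Str.startswith n normalized = true := by
  rw [PySem.Str.startswith_eq, PySem.Chars.startswith_iff] at h ⊢
  have hp : normalized.toList <+: (normalized ++ "_").toList := by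
    rw [String.toList_append]; exact List.prefix_append _ _
  exact hp.trans h

theorem pv_startswith_or (n normalized : String) :
    (PySem.Str.startswith n normalized || PySem.Str.startswith n (normalized ++ "_"))
      = PySem.Str.startswith n normalized := by
  cases h1 : PySem.Str.startswith n normalized with
  | true => simp
  | false =>
    cases h2 : PySem.Str.startswith n (normalized ++ "_") with
    | false => simp
    | true => rw [pv_startswith_imp n normalized h2] at h1; simp at h1

-- the single-pass fold computes (first q1-match, first q2-match), each seeded by the accumulator
theorem pv_fold_pair {β : Type} (q1 q2 : (String × β) → Bool) (l : List (String × β)) :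
    ∀ (a1 a2 : Option β),
    l.foldl
      (fun (acc : Option β × Option β) np =>
        ( if acc.1.isNone && q1 np then some np.2 else acc.1,
          if acc.2.isNone && q2 np then some np.2 else acc.2))
      (a1, a2)
    = (a1.or ((l.find? q1).map Prod.snd), a2.or ((l.find? q2).map Prod.snd)) := by
  induction l with
  | nil => intro a1 a2; simp
  | cons hd t ih =>
    intro a1 a2
    rw [List.foldl_cons, List.find?_cons]
    rw [show ((a1, a2) : Option β × Option β).1 = a1 from rfl,
        show ((a1, a2) : Option β × Option β).2 = a2 from rfl, ih]
    cases a1 <;> cases a2 <;> cases h1 : q1 hd <;> cases h2 : q2 hd <;> simp [h1, h2]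

theorem resolve_page_spec : Claim_equal_resolve_page := by
  intro project page_name _
  unfold Spec_resolve_page resolve_page resolve_page_alt
  simp only
  set pages : PySem.Dict String (List (String × String)) :=
    PySem.Dict.mk ((PySem.Dict.mk project).getD "pages" []) with hpages
  by_cases hc : pages.contains page_name = true
  · rw [if_pos hc]
    have := PySem.Dict.contains_eq_isSome_get? (d := pages) (k := page_name)
    rw [hc] at this
    cases hg : pages.get? page_name with
    | none => rw [hg] at this; simp at this
    | some v => simp
  · rw [if_neg hc]
    have hg : pages.get? page_name = none := by
      have := PySem.Dict.contains_eq_isSome_get? (d := pages) (k := page_name)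
      cases hgg : pages.get? page_name with
      | none => rfl
      | some v => rw [hgg] at this; simp at this; exact absurd this hc
    rw [hg]
    simp only
    set normalized := PySem.Str.stripChars
      (PySem.Str.replace (PySem.Str.replace (PySem.Str.replace page_name "." "_") "-" "_") " " "_") "_" with hn
    have hpred : (pages.items.filter
        (fun np => PySem.Str.startswith np.1 normalized || PySem.Str.startswith np.1 (normalized ++ "_")))
      = pages.items.filter (fun np => PySem.Str.startswith np.1 normalized) := by
      apply List.filter_congr
      intro x _
      exact pv_startswith_or x.1 normalized
    rw [hpred, pv_fold_pair]
    simp only [Option.none_or]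
    rw [pv_find?_eq_head?_filter, pv_find?_eq_head?_filter]
    cases hf : pages.items.filter (fun np => PySem.Str.startswith np.1 normalized) with
    | nil =>
      simp only [List.length_nil, List.isEmpty_nil, List.head?_nil, Option.map_none]
      cases hf2 : pages.items.filter
          (fun np => PySem.Str.isIn (PySem.Str.lower normalized) (PySem.Str.lower np.1)) with
      | nil => simp
      | cons b t => simp
    | cons a t =>
      cases t with
      | nil => simp
      | cons b t2 => simp
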